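-- pv_equiv track=rewrite | github.com/emlbrg/training_exercises | tandem_repeats/tandem_repeats.py | find_str_sliding_window
-- ===== SOURCE A (Python) =====
-- from typing import List, Dict
--
-- def find_str_sliding_window(seq_dict: Dict, min_repeat_count: int=14) -> List:
--     """Finds simple tandem repeats using a sliding window approach with fixed repeat unit length.
--
--     Args:
--         seq_dict (dict): Dictionary containing sequence IDs as keys and DNA sequences as values.
--         min_repeat_count (int): Minimum number of repeats to consider an STR.
--
--     Returns:
--         list: List of STRs (sequence ID, start position, end position, repeat unit, repeat count).
--     """
--     str_list = []
--
--     for seq_id, sequence in seq_dict.items():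
--         seq_length = len(sequence)
--         k = 2
--         found_positions: list = []
--
--         for i in range(seq_length - k + 1):
--             repeat_unit = sequence[i:i + k]
--             count = 0
--             j = i
--
--             while j < seq_length and sequence[j:j + k] == repeat_unit:  # Count consecutive?
--                 count += 1
--                 j += k
--
--             if count >= min_repeat_count:
--                 if not any(start < j and end > i for start, end in found_positions):  # Longest only
--                     str_list.append((seq_id, i + 1, j, repeat_unit, count))
--                     found_positions.append((i + 1, j))
--
--     return str_list
-- ===== SOURCE B (Python) =====
-- def find_str_sliding_window(seq_dict, min_repeat_count=14):
--     """Linear-time re-implementation: right-to-left DP for the run length of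
--     consecutive matching 2-mer blocks at each start, then a left-to-right scan
--     that keeps only the end of the last reported repeat (the overlap filter)."""
--     str_list = []
--     for seq_id, sequence in seq_dict.items():
--         n = len(sequence)
--         rev = []          # rev, built right-to-left: count at n-2, n-3, ..., 0
--         c1 = 0            # count at i + 1
--         c2 = 0            # count at i + 2
--         for i in range(n - 2, -1, -1):
--             if i + 3 < n and sequence[i] == sequence[i + 2] and sequence[i + 1] == sequence[i + 3]:
--                 c = c2 + 1
--             else:
--                 c = 1
--             rev.append(c)
--             c1, c2 = c, c1
--         counts = rev[::-1]
--         last_end = 0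
--         for i in range(n - 1):
--             c = counts[i]
--             if c >= min_repeat_count and last_end <= i:
--                 j = i + 2 * c
--                 str_list.append((seq_id, i + 1, j, sequence[i:i + 2], c))
--                 last_end = j
--     return str_list
-- ===== Notes on version B (the rewrite author's own statement) =====
-- stated objective: alternative
-- what changed: Replaces A's per-position forward rescanning while-loop and the scan over all previously found intervals by a right-to-left DP of consecutive 2-mer-block run lengths plus a single left-to-right pass that keeps only the last reported end for the overlap filter.
import Mathlib
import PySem

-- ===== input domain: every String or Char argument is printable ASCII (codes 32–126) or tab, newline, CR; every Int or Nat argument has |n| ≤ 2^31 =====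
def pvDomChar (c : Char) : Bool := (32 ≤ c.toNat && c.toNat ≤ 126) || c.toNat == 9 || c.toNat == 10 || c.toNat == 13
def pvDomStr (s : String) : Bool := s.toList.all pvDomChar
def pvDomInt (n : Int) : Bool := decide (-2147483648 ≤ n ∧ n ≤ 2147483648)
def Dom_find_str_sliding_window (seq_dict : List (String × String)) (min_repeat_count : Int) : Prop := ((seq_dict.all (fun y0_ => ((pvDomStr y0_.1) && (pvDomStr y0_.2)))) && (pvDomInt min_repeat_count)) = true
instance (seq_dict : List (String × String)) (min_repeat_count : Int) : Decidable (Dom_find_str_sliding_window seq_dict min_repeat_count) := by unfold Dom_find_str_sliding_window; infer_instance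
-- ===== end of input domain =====

-- B replaces A's per-position rescanning (and its scan over all found intervals) by a
-- right-to-left run-length DP plus one left-to-right pass; same return value, different algorithm.

-- ===== PORT A =====
-- the inner `while j < seq_length and sequence[j:j+k] == repeat_unit` loop (k = 2)
def pvAWhile (sequence : String) (seq_length : Int) (repeat_unit : String)
    (count j : Int) : Int × Int :=
  if h : j < seq_length ∧ PySem.Str.slice sequence (some j) (some (j + 2)) = repeat_unit then
    pvAWhile sequence seq_length repeat_unit (count + 1) (j + 2)
  else (count, j)
termination_by (seq_length - j).toNat
decreasing_by have := h.1; omega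

-- the body of `for i in range(seq_length - k + 1)` (state: str_list, found_positions)
def pvAStep (seq_id sequence : String) (seq_length min_repeat_count : Int)
    (st : List (String × Int × Int × String × Int) × List (Int × Int)) (i : Int) :
    List (String × Int × Int × String × Int) × List (Int × Int) :=
  let repeat_unit := PySem.Str.slice sequence (some i) (some (i + 2))
  let r := pvAWhile sequence seq_length repeat_unit 0 i
  if r.1 ≥ min_repeat_count then
    if ¬ (st.2.any (fun p => decide (p.1 < r.2) && decide (p.2 > i))) then
      (st.1 ++ [(seq_id, i + 1, r.2, repeat_unit, r.1)], st.2 ++ [(i + 1, r.2)])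
    else st
  else st

-- one iteration of `for seq_id, sequence in seq_dict.items()`
def pvASeq (min_repeat_count : Int) (str_list : List (String × Int × Int × String × Int))
    (seq_id sequence : String) : List (String × Int × Int × String × Int) :=
  let seq_length : Int := (PySem.Str.len sequence : Int)
  ((PySem.List.pyRange 0 (seq_length - 2 + 1) 1).foldl
      (pvAStep seq_id sequence seq_length min_repeat_count)
      (str_list, ([] : List (Int × Int)))).1

def find_str_sliding_window (seq_dict : List (String × String)) (min_repeat_count : Int) :
    List (String × Int × Int × String × Int) :=
  (PySem.Dict.ofList seq_dict).items.foldl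
    (fun str_list p => pvASeq min_repeat_count str_list p.1 p.2) []

-- ===== PORT B =====
-- body of the right-to-left DP loop: state (rev, c1, c2) with c1/c2 the counts at i+1/i+2
def pvBRevStep (sequence : String) (n : Int) (st : List Int × Int × Int) (i : Int) :
    List Int × Int × Int :=
  let c : Int :=
    if i + 3 < n ∧ PySem.Str.pyGet? sequence i = PySem.Str.pyGet? sequence (i + 2)
        ∧ PySem.Str.pyGet? sequence (i + 1) = PySem.Str.pyGet? sequence (i + 3) then
      st.2.2 + 1
    else 1
  (st.1 ++ [c], c, st.2.1)

-- body of the left-to-right reporting pass: state (str_list, last_end)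
def pvBScanStep (seq_id sequence : String) (min_repeat_count : Int) (counts : List Int)
    (st : List (String × Int × Int × String × Int) × Int) (i : Int) :
    List (String × Int × Int × String × Int) × Int :=
  let c := PySem.List.pyGetD counts i 0
  if c ≥ min_repeat_count ∧ st.2 ≤ i then
    (st.1 ++ [(seq_id, i + 1, i + 2 * c, PySem.Str.slice sequence (some i) (some (i + 2)), c)],
     i + 2 * c)
  else st

def pvBSeq (min_repeat_count : Int) (str_list : List (String × Int × Int × String × Int))
    (seq_id sequence : String) : List (String × Int × Int × String × Int) :=
  let n : Int := (PySem.Str.len sequence : Int)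
  let rs := (PySem.List.pyRange (n - 2) (-1) (-1)).foldl (pvBRevStep sequence n)
      (([] : List Int), (0 : Int), (0 : Int))
  let counts := (PySem.List.slice? rs.1 none none (-1)).getD []   -- rev[::-1]
  ((PySem.List.pyRange 0 (n - 1) 1).foldl
      (pvBScanStep seq_id sequence min_repeat_count counts)
      (str_list, (0 : Int))).1

def find_str_sliding_window_alt (seq_dict : List (String × String)) (min_repeat_count : Int) :
    List (String × Int × Int × String × Int) :=
  (PySem.Dict.ofList seq_dict).items.foldl
    (fun str_list p => pvBSeq min_repeat_count str_list p.1 p.2) []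

-- ===== PRECONDITION & SPEC =====
def Spec_find_str_sliding_window (seq_dict : List (String × String)) (min_repeat_count : Int) (out : List (String × Int × Int × String × Int)) : Prop := out = find_str_sliding_window_alt seq_dict min_repeat_count
instance (seq_dict : List (String × String)) (min_repeat_count : Int) (out : List (String × Int × Int × String × Int)) : Decidable (Spec_find_str_sliding_window seq_dict min_repeat_count out) := by unfold Spec_find_str_sliding_window; infer_instance

-- ===== CLAIM (what is proved, stated in full; the proofs are below) =====
def Claim_equal_find_str_sliding_window : Prop := ∀ (seq_dict : List (String × String)) (min_repeat_count : Int), Dom_find_str_sliding_window seq_dict min_repeat_count → Spec_find_str_sliding_window seq_dict min_repeat_count (find_str_sliding_window seq_dict min_repeat_count)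

-- ===== LEMMAS AND PROOFS =====

-- number of consecutive matching 2-mer blocks starting at i (always ≥ 1)
def pvCnt (cs : List Char) (i : Nat) : Int :=
  if h : i + 3 < cs.length ∧ cs[i]? = cs[i + 2]? ∧ cs[i + 1]? = cs[i + 3]? then
    pvCnt cs (i + 2) + 1
  else 1
termination_by cs.length - i
decreasing_by have := h.1; omega

theorem pvCnt_pos (cs : List Char) (i : Nat) : 1 ≤ pvCnt cs i := by
  fun_induction pvCnt cs i with
  | case1 i h ih => omega
  | case2 i h => omega

-- total variant on Int indices (0 outside the window-start range)
def pvC (cs : List Char) (i : Int) : Int :=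
  if 0 ≤ i ∧ i ≤ (cs.length : Int) - 2 then pvCnt cs i.toNat else 0

theorem pvC_pos (cs : List Char) (t : Int) (h0 : 0 ≤ t) (h2 : t ≤ (cs.length : Int) - 2) :
    1 ≤ pvC cs t := by
  rw [pvC, if_pos ⟨h0, h2⟩]; exact pvCnt_pos _ _

theorem pvSliceInt (s : String) (a : Int) (h0 : 0 ≤ a) :
    (PySem.Str.slice s (some a) (some (a + 2))).toList = (s.toList.drop a.toNat).take 2 := by
  simp only [PySem.Str.toList_slice, PySem.Chars.slice_eq_listSlice]
  rw [PySem.List.slice_toNat s.toList h0 (by omega)]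
  congr 1
  omega

theorem pvBlk (cs : List Char) (i : Nat) (h : i + 2 ≤ cs.length) :
    (cs.drop i).take 2 = [cs[i]'(by omega), cs[i + 1]'(by omega)] := by
  rw [List.drop_eq_getElem_cons (by omega), List.drop_eq_getElem_cons (i := i + 1) (by omega)]
  rfl

-- the while-condition at j = t+2 holds iff the character-level 2-mer match holds
theorem pvGuard_iff (s : String) (t : Int) (h0 : 0 ≤ t)
    (h : t + 2 ≤ (s.toList.length : Int)) :
    (t + 2 < (s.toList.length : Int)
      ∧ PySem.Str.slice s (some (t + 2)) (some (t + 2 + 2)) = PySem.Str.slice s (some t) (some (t + 2)))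
    ↔ (t.toNat + 3 < s.toList.length
      ∧ s.toList[t.toNat]? = s.toList[t.toNat + 2]?
      ∧ s.toList[t.toNat + 1]? = s.toList[t.toNat + 3]?) := by
  have hsl1 : (PySem.Str.slice s (some t) (some (t + 2))).toList
      = (s.toList.drop t.toNat).take 2 := pvSliceInt s t h0
  have hsl2 : (PySem.Str.slice s (some (t + 2)) (some (t + 2 + 2))).toList
      = (s.toList.drop (t + 2).toNat).take 2 := pvSliceInt s (t + 2) (by omega)
  have et : (t + 2).toNat = t.toNat + 2 := by omega
  have hb1 : (s.toList.drop t.toNat).take 2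
      = [s.toList[t.toNat]'(by omega), s.toList[t.toNat + 1]'(by omega)] := pvBlk _ _ (by omega)
  constructor
  · rintro ⟨h1, h2⟩
    have h2' := congrArg String.toList h2
    rw [hsl1, hsl2, hb1] at h2'
    have hlen := congrArg List.length h2'
    simp only [List.length_take, List.length_drop, List.length_cons, List.length_nil] at hlen
    have h3 : t.toNat + 3 < s.toList.length := by omega
    rw [et, pvBlk _ _ (by omega)] at h2'
    simp only [List.cons.injEq, and_true] at h2'
    obtain ⟨q1, q2⟩ := h2'
    refine ⟨h3, ?_, ?_⟩
    · rw [List.getElem?_eq_getElem (by omega), List.getElem?_eq_getElem (by omega)]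
      exact congrArg some q1.symm
    · rw [List.getElem?_eq_getElem (by omega), List.getElem?_eq_getElem (by omega)]
      exact congrArg some q2.symm
  · rintro ⟨h3, e1, e2⟩
    refine ⟨by omega, ?_⟩
    apply String.toList_inj.mp
    rw [hsl1, hsl2, hb1, et, pvBlk _ _ (by omega)]
    rw [List.getElem?_eq_getElem (by omega), List.getElem?_eq_getElem (by omega)] at e1
    rw [List.getElem?_eq_getElem (by omega), List.getElem?_eq_getElem (by omega)] at e2
    simp only [Option.some_inj] at e1 e2
    exact List.cons_eq_cons.mpr ⟨e1.symm, List.cons_eq_cons.mpr ⟨e2.symm, rfl⟩⟩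

-- unfolding pvC one step, guard in character form
theorem pvC_succ (s : String) (t : Int) (h0 : 0 ≤ t) (h : t + 2 ≤ (s.toList.length : Int)) :
    pvC s.toList t
      = if t.toNat + 3 < s.toList.length
            ∧ s.toList[t.toNat]? = s.toList[t.toNat + 2]?
            ∧ s.toList[t.toNat + 1]? = s.toList[t.toNat + 3]? then
          pvC s.toList (t + 2) + 1
        else 1 := by
  rw [pvC, if_pos ⟨h0, by omega⟩, pvCnt]
  by_cases hg : t.toNat + 3 < s.toList.length
      ∧ s.toList[t.toNat]? = s.toList[t.toNat + 2]? ∧ s.toList[t.toNat + 1]? = s.toList[t.toNat + 3]?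
  · rw [dif_pos hg, if_pos hg, pvC, if_pos ⟨by omega, by omega⟩]
    have e : (t + 2).toNat = t.toNat + 2 := by omega
    rw [e]
  · rw [dif_neg hg, if_neg hg]

theorem pvA_while_eq (s : String) (t : Int) (h0 : 0 ≤ t)
    (h : t + 2 ≤ (s.toList.length : Int)) (c : Int) :
    pvAWhile s (s.toList.length : Int) (PySem.Str.slice s (some t) (some (t + 2))) c t
    = (c + pvC s.toList t, t + 2 * pvC s.toList t) := by
  rw [pvAWhile, dif_pos ⟨by omega, rfl⟩]
  by_cases hg : t + 2 < (s.toList.length : Int)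
      ∧ PySem.Str.slice s (some (t + 2)) (some (t + 2 + 2)) = PySem.Str.slice s (some t) (some (t + 2))
  · have hG := (pvGuard_iff s t h0 h).mp hg
    rw [← hg.2]
    rw [pvA_while_eq s (t + 2) (by omega) (by omega) (c + 1)]
    rw [pvC_succ s t h0 h, if_pos hG]
    simp only [Prod.mk.injEq]
    constructor
    · omega
    · omega
  · rw [pvAWhile, dif_neg hg]
    rw [pvC_succ s t h0 h, if_neg (fun hG => hg ((pvGuard_iff s t h0 h).mpr hG))]
    simp only [Prod.mk.injEq]
    refine ⟨trivial, by ring⟩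
termination_by ((s.toList.length : Int) - t).toNat
decreasing_by omega

-- one descending-range snoc step
theorem pvRangeSnoc (a t : Int) (h : t ≤ a) :
    PySem.List.pyRange a (t - 1) (-1) = PySem.List.pyRange a t (-1) ++ [t] := by
  rw [PySem.List.pyRange_neg_one_eq_reverse, PySem.List.pyRange_neg_one_eq_reverse,
    show t - 1 + 1 = t by ring, PySem.List.pyRange_one_cons (show t < a + 1 by omega)]
  simp

-- B's DP guard computes pvC
theorem pvC_stepB (s : String) (t : Int) (h0 : 0 ≤ t) (h2 : t ≤ (s.toList.length : Int) - 2) :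
    (if t + 3 < (s.toList.length : Int)
        ∧ PySem.Str.pyGet? s t = PySem.Str.pyGet? s (t + 2)
        ∧ PySem.Str.pyGet? s (t + 1) = PySem.Str.pyGet? s (t + 3) then
      pvC s.toList (t + 2) + 1
    else 1) = pvC s.toList t := by
  have hb : ∀ u : Int, 0 ≤ u → PySem.Str.pyGet? s u = s.toList[u.toNat]? := by
    intro u hu
    rw [PySem.Str.pyGet?_eq, PySem.Chars.pyGet?_eq_listPyGet?]
    exact PySem.List.pyGet?_of_nonneg _ hu
  have e1 : (t + 2).toNat = t.toNat + 2 := by omega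
  have e2 : (t + 1).toNat = t.toNat + 1 := by omega
  have e3 : (t + 3).toNat = t.toNat + 3 := by omega
  rw [pvC_succ s t h0 (by omega)]
  by_cases hg : t.toNat + 3 < s.toList.length
      ∧ s.toList[t.toNat]? = s.toList[t.toNat + 2]? ∧ s.toList[t.toNat + 1]? = s.toList[t.toNat + 3]?
  · rw [if_pos hg, if_pos]
    refine ⟨by omega, ?_, ?_⟩
    · rw [hb t h0, hb (t + 2) (by omega), e1]; exact hg.2.1
    · rw [hb (t + 1) (by omega), hb (t + 3) (by omega), e2, e3]; exact hg.2.2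
  · rw [if_neg hg, if_neg]
    rintro ⟨k1, k2, k3⟩
    apply hg
    rw [hb t h0, hb (t + 2) (by omega), e1] at k2
    rw [hb (t + 1) (by omega), hb (t + 3) (by omega), e2, e3] at k3
    exact ⟨by omega, k2, k3⟩

theorem pvRevAux (s : String) (t : Int) (h1 : -1 ≤ t) (h2 : t ≤ (s.toList.length : Int) - 2) :
    (PySem.List.pyRange t (-1) (-1)).foldl (pvBRevStep s (s.toList.length : Int))
      ((PySem.List.pyRange ((s.toList.length : Int) - 2) t (-1)).map (pvC s.toList),
        pvC s.toList (t + 1), pvC s.toList (t + 2))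
    = ((PySem.List.pyRange ((s.toList.length : Int) - 2) (-1) (-1)).map (pvC s.toList),
        pvC s.toList 0, pvC s.toList 1) := by
  by_cases ht : t = -1
  · subst ht
    rw [PySem.List.pyRange_neg_one_eq_nil (le_refl _)]
    norm_num
  · have h0 : 0 ≤ t := by omega
    rw [show PySem.List.pyRange t (-1) (-1) = t :: PySem.List.pyRange (t - 1) (-1) (-1) from
      PySem.List.pyRange_neg_one_cons (by omega), List.foldl_cons]
    have hstep : pvBRevStep s (s.toList.length : Int)
        ((PySem.List.pyRange ((s.toList.length : Int) - 2) t (-1)).map (pvC s.toList),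
          pvC s.toList (t + 1), pvC s.toList (t + 2)) t
        = ((PySem.List.pyRange ((s.toList.length : Int) - 2) (t - 1) (-1)).map (pvC s.toList),
          pvC s.toList ((t - 1) + 1), pvC s.toList ((t - 1) + 2)) := by
      rw [pvBRevStep]
      rw [pvRangeSnoc _ _ h2]
      simp only [List.map_append, List.map_cons, List.map_nil]
      rw [pvC_stepB s t h0 h2, show t - 1 + 1 = t by ring, show t - 1 + 2 = t + 1 by ring]
    rw [hstep]
    exact pvRevAux s (t - 1) (by omega) (by omega)
termination_by (t + 1).toNat
decreasing_by omega

theorem pvB_counts_eq (s : String) :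
    ((PySem.List.slice?
        ((PySem.List.pyRange ((s.toList.length : Int) - 2) (-1) (-1)).foldl
          (pvBRevStep s (s.toList.length : Int)) (([] : List Int), (0 : Int), (0 : Int))).1
        none none (-1)).getD [])
    = (PySem.List.pyRange 0 ((s.toList.length : Int) - 1) 1).map (pvC s.toList) := by
  by_cases hn : 2 ≤ s.toList.length
  · have hinit : (([] : List Int), (0 : Int), (0 : Int))
        = ((PySem.List.pyRange ((s.toList.length : Int) - 2) ((s.toList.length : Int) - 2) (-1)).map (pvC s.toList),
            pvC s.toList (((s.toList.length : Int) - 2) + 1),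
            pvC s.toList (((s.toList.length : Int) - 2) + 2)) := by
      rw [PySem.List.pyRange_neg_one_eq_nil (le_refl _)]
      rw [pvC, if_neg (by omega), pvC, if_neg (by omega)]
      rfl
    rw [hinit, pvRevAux s _ (by omega) (le_refl _)]
    rw [PySem.List.slice?_none_none_neg_one]
    show (((PySem.List.pyRange ((s.toList.length : Int) - 2) (-1) (-1)).map (pvC s.toList)).reverse) = _
    rw [PySem.List.pyRange_neg_one_eq_reverse, List.map_reverse, List.reverse_reverse,
      show ((-1 : Int) + 1) = 0 by ring,
      show ((s.toList.length : Int) - 2 + 1) = (s.toList.length : Int) - 1 by ring]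
  · have e1 : PySem.List.pyRange ((s.toList.length : Int) - 2) (-1) (-1) = [] :=
      PySem.List.pyRange_neg_one_eq_nil (by omega)
    have e2 : PySem.List.pyRange 0 ((s.toList.length : Int) - 1) 1 = [] :=
      PySem.List.pyRange_one_eq_nil (by omega)
    rw [e1, e2]
    rfl

theorem pvScan_eq (seq_id s : String) (mrc : Int) (t : Int) (h0 : 0 ≤ t)
    (acc : List (String × Int × Int × String × Int)) (fp : List (Int × Int)) (le : Int)
    (hle0 : 0 ≤ le) (hfp : ∀ p ∈ fp, p.1 ≤ t ∧ p.2 ≤ le) (hw : le ≤ t ∨ ∃ p ∈ fp, p.2 = le) :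
    ((PySem.List.pyRange t ((s.toList.length : Int) - 1) 1).foldl
        (pvAStep seq_id s (s.toList.length : Int) mrc) (acc, fp)).1
      = ((PySem.List.pyRange t ((s.toList.length : Int) - 1) 1).foldl
          (pvBScanStep seq_id s mrc
            ((PySem.List.pyRange 0 ((s.toList.length : Int) - 1) 1).map (pvC s.toList)))
          (acc, le)).1 := by
  by_cases hend : (s.toList.length : Int) - 1 ≤ t
  · rw [PySem.List.pyRange_one_eq_nil hend]
    rfl
  · have ht2 : t ≤ (s.toList.length : Int) - 2 := by omega
    rw [PySem.List.pyRange_one_cons (by omega), List.foldl_cons, List.foldl_cons]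
    have hK1 : 1 ≤ pvC s.toList t := pvC_pos _ _ h0 ht2
    have hcB : PySem.List.pyGetD
        ((PySem.List.pyRange 0 ((s.toList.length : Int) - 1) 1).map (pvC s.toList)) t 0
        = pvC s.toList t :=
      PySem.List.pyGetD_map_pyRange_of_nonneg _ _ _ _ h0 (by omega)
    have hwhile := pvA_while_eq s t h0 (by omega) 0
    by_cases hm : pvC s.toList t ≥ mrc
    · by_cases hle : le ≤ t
      · -- both accept and report the same repeat
        have hstepA : pvAStep seq_id s (s.toList.length : Int) mrc (acc, fp) t
            = (acc ++ [(seq_id, t + 1, t + 2 * pvC s.toList t,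
                  PySem.Str.slice s (some t) (some (t + 2)), pvC s.toList t)],
               fp ++ [(t + 1, t + 2 * pvC s.toList t)]) := by
          rw [pvAStep, hwhile]
          have hany : fp.any (fun p => decide (p.1 < t + 2 * pvC s.toList t)
              && decide (p.2 > t)) = false := by
            rw [List.any_eq_false]
            intro p hp
            have := hfp p hp
            simp only [Bool.and_eq_true, decide_eq_true_eq, not_and]
            intro _
            omega
          simp only [ge_iff_le, zero_add]
          rw [if_pos hm, hany]
          norm_num
        have hstepB : pvBScanStep seq_id s mrc
            ((PySem.List.pyRange 0 ((s.toList.length : Int) - 1) 1).map (pvC s.toList)) (acc, le) t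
            = (acc ++ [(seq_id, t + 1, t + 2 * pvC s.toList t,
                  PySem.Str.slice s (some t) (some (t + 2)), pvC s.toList t)],
               t + 2 * pvC s.toList t) := by
          rw [pvBScanStep]
          simp only [hcB]
          rw [if_pos ⟨hm, hle⟩]
        rw [hstepA, hstepB]
        refine pvScan_eq seq_id s mrc (t + 1) (by omega) _ _ _ (by omega) ?_
          (Or.inr ⟨(t + 1, t + 2 * pvC s.toList t), List.mem_append_right _ (by simp), rfl⟩)
        intro p hp
        rcases List.mem_append.mp hp with hp | hp
        · have := hfp p hp
          exact ⟨by omega, by omega⟩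
        · simp at hp
          rw [hp]
          exact ⟨by omega, by omega⟩
      · -- an earlier repeat still covers position t: both skip
        rcases hw with hw | ⟨p0, hp0mem, hp0⟩
        · omega
        have hstepA : pvAStep seq_id s (s.toList.length : Int) mrc (acc, fp) t = (acc, fp) := by
          rw [pvAStep, hwhile]
          have hany : fp.any (fun p => decide (p.1 < t + 2 * pvC s.toList t)
              && decide (p.2 > t)) = true := by
            rw [List.any_eq_true]
            refine ⟨p0, hp0mem, ?_⟩
            have := hfp p0 hp0mem
            simp only [Bool.and_eq_true, decide_eq_true_eq]
            exact ⟨by omega, by omega⟩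
          simp only [ge_iff_le, zero_add]
          rw [if_pos hm, hany]
          norm_num
        have hstepB : pvBScanStep seq_id s mrc
            ((PySem.List.pyRange 0 ((s.toList.length : Int) - 1) 1).map (pvC s.toList)) (acc, le) t
            = (acc, le) := by
          rw [pvBScanStep]
          simp only [hcB]
          rw [if_neg (by omega)]
        rw [hstepA, hstepB]
        exact pvScan_eq seq_id s mrc (t + 1) (by omega) _ _ _ hle0
          (fun p hp => ⟨by have := hfp p hp; omega, (hfp p hp).2⟩)
          (Or.inr ⟨p0, hp0mem, hp0⟩)
    · -- repeat count below the threshold: both skip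
      have hstepA : pvAStep seq_id s (s.toList.length : Int) mrc (acc, fp) t = (acc, fp) := by
        rw [pvAStep, hwhile]
        simp only [ge_iff_le, zero_add]
        rw [if_neg (by omega)]
      have hstepB : pvBScanStep seq_id s mrc
          ((PySem.List.pyRange 0 ((s.toList.length : Int) - 1) 1).map (pvC s.toList)) (acc, le) t
          = (acc, le) := by
        rw [pvBScanStep]
        simp only [hcB]
        rw [if_neg (by omega)]
      rw [hstepA, hstepB]
      refine pvScan_eq seq_id s mrc (t + 1) (by omega) _ _ _ hle0
        (fun p hp => ⟨by have := hfp p hp; omega, (hfp p hp).2⟩) ?_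
      rcases hw with hw | hw
      · exact Or.inl (by omega)
      · exact Or.inr hw
termination_by ((s.toList.length : Int) - 1 - t).toNat
decreasing_by all_goals omega

theorem pvSeq_eq (mrc : Int) (acc : List (String × Int × Int × String × Int))
    (seq_id s : String) : pvASeq mrc acc seq_id s = pvBSeq mrc acc seq_id s := by
  unfold pvASeq pvBSeq
  have hlen : PySem.Str.len s = ((s.toList.length : Nat) : Int) := by
    simp [PySem.Str.len_eq]
  simp only [hlen]
  rw [show ((s.toList.length : Nat) : Int) - 2 + 1 = ((s.toList.length : Nat) : Int) - 1 by ring]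
  rw [pvB_counts_eq s]
  exact pvScan_eq seq_id s mrc 0 (le_refl _) acc [] 0 (le_refl _) (by simp) (Or.inl (le_refl _))

-- ===== VERDICT (by name: the statement is the Claim_ definition above) =====
theorem find_str_sliding_window_spec : Claim_equal_find_str_sliding_window := by
  intro seq_dict mrc _
  unfold Spec_find_str_sliding_window find_str_sliding_window find_str_sliding_window_alt
  have h : (fun (str_list : List (String × Int × Int × String × Int)) (p : String × String) =>
      pvASeq mrc str_list p.1 p.2)
      = (fun str_list p => pvBSeq mrc str_list p.1 p.2) := by
    funext str_list p
    exact pvSeq_eq mrc str_list p.1 p.2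
  rw [h]
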